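-- pv_equiv track=rewrite | github.com/stevezg/adventOfCode2025 | Day6/solution2.py | parse_worksheet
-- ===== SOURCE A (Python) =====
-- def parse_worksheet(input_text):
--     """Parse the worksheet and identify problem column ranges."""
--     lines = input_text.strip().split('\n')
--
--     if not lines:
--         return []
--
--     # Find the maximum line length
--     max_len = max(len(line) for line in lines)
--
--     # Pad all lines to the same length
--     padded_lines = [line.ljust(max_len) for line in lines]
--
--     # Find columns that are all spaces (separators)
--     separator_columns = []
--     for col_idx in range(max_len):
--         column_chars = [padded_lines[row_idx][col_idx] for row_idx in range(len(padded_lines))]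
--         if all(char == ' ' for char in column_chars):
--             separator_columns.append(col_idx)
--
--     # Identify problem ranges (groups of non-separator columns)
--     problem_ranges = []
--     start = None
--
--     for col_idx in range(max_len):
--         if col_idx in separator_columns:
--             if start is not None:
--                 # End of a problem
--                 problem_ranges.append((start, col_idx - 1))
--                 start = None
--         else:
--             if start is None:
--                 # Start of a problem
--                 start = col_idx
--
--     # Don't forget the last problem
--     if start is not None:
--         problem_ranges.append((start, max_len - 1))
--
--     # Extract the content for each problem
--     problems = []
--     for start_col, end_col in problem_ranges:
--         problem_lines = []
--         for line in padded_lines: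
--             problem_lines.append(line[start_col:end_col + 1])
--         problems.append(problem_lines)
--
--     return problems
-- ===== SOURCE B (Python) =====
-- def parse_worksheet(input_text):
--     """Parse the worksheet into problem blocks by transposing into columns
--     and grouping consecutive non-blank columns."""
--     lines = input_text.strip().split('\n')
--     max_len = max(len(line) for line in lines)
--     padded = [line.ljust(max_len) for line in lines]
--
--     problems = []
--     group = []
--     for col in zip(*padded):
--         if all(ch == ' ' for ch in col):
--             if group:
--                 problems.append([''.join(row) for row in zip(*group)])
--                 group = []
--         else:
--             group.append(col)
--     if group:
--         problems.append([''.join(row) for row in zip(*group)])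
--     return problems
-- ===== Notes on version B (the rewrite author's own statement) =====
-- stated objective: idiomatic
-- what changed: A builds a separator-column index list, then a list of (start,end) column ranges, then slices every padded line per range in three index-driven passes; B transposes the padded grid into columns with zip(*padded) and makes one pass over the columns, grouping consecutive non-blank columns and rebuilding each problem's lines by transposing the group back.
import Mathlib
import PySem

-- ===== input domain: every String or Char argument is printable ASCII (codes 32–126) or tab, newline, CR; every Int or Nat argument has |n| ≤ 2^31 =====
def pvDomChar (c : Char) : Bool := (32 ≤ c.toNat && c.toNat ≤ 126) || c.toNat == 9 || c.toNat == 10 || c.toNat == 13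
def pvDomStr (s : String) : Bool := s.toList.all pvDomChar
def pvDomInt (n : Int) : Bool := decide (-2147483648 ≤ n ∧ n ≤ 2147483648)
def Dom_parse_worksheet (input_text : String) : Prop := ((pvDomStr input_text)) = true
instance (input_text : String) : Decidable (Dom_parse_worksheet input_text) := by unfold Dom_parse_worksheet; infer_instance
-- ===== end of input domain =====

-- B replaces A's three index passes (separator-column list, range pairs, row slicing) by one pass
-- over the transposed column list, grouping consecutive non-blank columns (objective: idiomatic).

-- ===== PORT A =====
def parse_worksheet (input_text : String) : List (List String) :=
  let lines := PySem.Chars.splitOn (PySem.Chars.strip input_text.toList) ['\n']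
  if lines = [] then []
  else
    match PySem.List.max? (lines.map (fun l => (l.length : Int))) (fun x => x) with
    | none => []   -- unreachable totality guard: 'lines' is nonempty here, so Python's max does not raise
    | some maxLen =>
      let padded := lines.map (fun l => l ++ List.replicate (maxLen.toNat - l.length) ' ')
      let sepCols := (PySem.List.pyRange 0 maxLen 1).foldl (fun acc c =>
        let columnChars := (PySem.List.pyRange 0 (PySem.List.len padded) 1).map
          (fun r => PySem.List.pyGetD (PySem.List.pyGetD padded r []) c ' ')
        if columnChars.all (fun ch => ch == ' ') then acc ++ [c] else acc) []
      let rs := (PySem.List.pyRange 0 maxLen 1).foldl (fun (st : List (Int × Int) × Option Int) c =>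
        if sepCols.contains c then
          match st.2 with
          | some s => (st.1 ++ [(s, c - 1)], none)
          | none => st
        else
          match st.2 with
          | some _ => st
          | none => (st.1, some c)) ([], none)
      let problemRanges := match rs.2 with
        | some s => rs.1 ++ [(s, maxLen - 1)]
        | none => rs.1
      problemRanges.map (fun se =>
        padded.map (fun line => String.ofList (PySem.List.slice line (some se.1) (some (se.2 + 1)))))

-- ===== PORT B =====
-- zip(*rows) on char rows: the i-th output lists the i-th char of each row, for i below the
-- shortest row length (exact port of Python's variadic zip truncation rule).
def pvZipStar (rows : List (List Char)) : List (List Char) :=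
  (List.range (((rows.map List.length).min?).getD 0)).map
    (fun i => rows.map (fun r => r.getD i ' '))

def parse_worksheet_alt (input_text : String) : List (List String) :=
  let lines := PySem.Chars.splitOn (PySem.Chars.strip input_text.toList) ['\n']
  match PySem.List.max? (lines.map (fun l => (l.length : Int))) (fun x => x) with
  | none => []   -- unreachable totality guard: 'lines' is never empty
  | some maxLen =>
    let padded := lines.map (fun l => l ++ List.replicate (maxLen.toNat - l.length) ' ')
    let st := (pvZipStar padded).foldl (fun (st : List (List String) × List (List Char)) col =>
      if col.all (fun ch => ch == ' ') then
        if st.2.isEmpty then st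
        else (st.1 ++ [(pvZipStar st.2).map String.ofList], ([] : List (List Char)))
      else (st.1, st.2 ++ [col])) ([], [])
    if st.2.isEmpty then st.1 else st.1 ++ [(pvZipStar st.2).map String.ofList]

-- ===== PRECONDITION & SPEC =====
def Spec_parse_worksheet (input_text : String) (out : List (List String)) : Prop := out = parse_worksheet_alt input_text
instance (input_text : String) (out : List (List String)) : Decidable (Spec_parse_worksheet input_text out) := by unfold Spec_parse_worksheet; infer_instance

-- ===== CLAIM (what is proved, stated in full; the proofs are below) =====
def Claim_equal_parse_worksheet : Prop := ∀ (input_text : String), Dom_parse_worksheet input_text → Spec_parse_worksheet input_text (parse_worksheet input_text)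

-- ===== LEMMAS AND PROOFS =====

-- min over a constant-valued list (the length list of a nonempty uniform matrix)
theorem pv_min_map_const {α : Type} (l : List α) (n : Nat) (h : l ≠ []) :
    ((l.map (fun _ => n)).min?).getD 0 = n := by
  have key : ∀ t : List α, ((t.map (fun _ => n)).min?).elim n (min n) = n := by
    intro t
    induction t with
    | nil => rfl
    | cons a t ih => rw [List.map_cons, List.min?_cons]; simp only [Option.elim_some, ih, Nat.min_self]
  cases l with
  | nil => exact absurd rfl h
  | cons a t =>
    rw [List.map_cons, List.min?_cons]
    simpa using key t

-- reading consecutive positions of a row is drop-take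
theorem pv_map_getD_range' (r : List Char) (s k : Nat) (h : s + k ≤ r.length) :
    (List.range' s k).map (fun c => r.getD c ' ') = (r.drop s).take k := by
  induction k generalizing s with
  | zero => simp
  | succ k ih =>
    have hs : s < r.length := by omega
    rw [List.range'_succ, List.map_cons, List.drop_eq_getElem_cons hs, List.take_succ_cons,
      ih (s + 1) (by omega), List.getD_eq_getElem r ' ' hs]

-- getD through map
theorem pv_getD_map (L : List (List Char)) (f : List Char → Char) (i : Nat)
    (h : i < L.length) (d : Char) : (L.map f).getD i d = f (L[i]) := by
  simp [List.getD_eq_getElem?_getD, List.getElem?_map, List.getElem?_eq_getElem h]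

-- row slicing equals transposing the corresponding run of columns
theorem pv_extract_eq_flush (L : List (List Char)) (m s k : Nat)
    (hm : ∀ r ∈ L, r.length = m) (_hL : L ≠ []) (hk : 1 ≤ k) (hsk : s + k ≤ m) :
    L.map (fun line => String.ofList (PySem.List.slice line (some (s : Int)) (some ((s : Int) + (k : Int))))) =
    (pvZipStar ((List.range' s k).map (fun c => L.map (fun r => r.getD c ' ')))).map String.ofList := by
  have hcast : ((s : Int) + (k : Int)) = ((s + k : Nat) : Int) := by push_cast; ring
  rw [hcast]
  have hmin : ((((List.range' s k).map (fun c => L.map (fun r => r.getD c ' '))).map List.length).min?).getD 0 = L.length := by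
    rw [List.map_map]
    have h1 : (List.range' s k).map (List.length ∘ fun c => L.map (fun r => r.getD c ' ')) =
        (List.range' s k).map (fun _ => L.length) := by
      apply List.map_congr_left; intro c _; simp
    rw [h1]
    exact pv_min_map_const _ _ (by simp [List.range'_eq_nil_iff]; omega)
  unfold pvZipStar
  rw [hmin]
  apply List.ext_getElem
  · simp
  · intro i h1 h2
    simp only [List.getElem_map, List.getElem_range, List.length_map] at h1 h2 ⊢
    have hi : i < L.length := by simpa using h1
    congr 1
    rw [List.map_map]
    have h3 : (List.range' s k).map ((fun r => r.getD i ' ') ∘ fun c => L.map fun r => r.getD c ' ') =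
        (List.range' s k).map (fun c => (L[i]).getD c ' ') := by
      apply List.map_congr_left; intro c _
      exact pv_getD_map L (fun r => r.getD c ' ') i hi ' '
    rw [h3, pv_map_getD_range' _ _ _ (by rw [hm _ (List.getElem_mem hi)]; exact hsk),
      PySem.List.slice_natCast]
    congr 1
    omega

-- the two grouping loops agree, column by column
theorem pv_fold_main (L : List (List Char)) (m : Nat) (sepCols : List Int)
    (hm : ∀ r ∈ L, r.length = m) (hL : L ≠ [])
    (hsep : ∀ j : Nat, j < m →
      (sepCols.contains (j : Int)) = (L.map (fun r => r.getD j ' ')).all (fun ch => ch == ' ')) :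
    ∀ (k j : Nat) (rs : List (Int × Int)) (st : Option Int) (ps : List (List String)) (g : List (List Char)),
    j + k = m →
    ps = rs.map (fun se => L.map (fun line => String.ofList (PySem.List.slice line (some se.1) (some (se.2 + 1))))) →
    (st = none ∧ g = [] ∨ ∃ s : Nat, st = some (s : Int) ∧ s < j ∧
      g = (List.range' s (j - s)).map (fun c => L.map (fun r => r.getD c ' '))) →
    ((match ((List.range' j k).foldl (fun (st : List (Int × Int) × Option Int) (c : Nat) =>
        if sepCols.contains (c : Int) then
          match st.2 with
          | some s => (st.1 ++ [(s, (c : Int) - 1)], none)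
          | none => st
        else
          match st.2 with
          | some _ => st
          | none => (st.1, some (c : Int))) (rs, st)).2 with
      | some s => ((List.range' j k).foldl (fun (st : List (Int × Int) × Option Int) (c : Nat) =>
          if sepCols.contains (c : Int) then
            match st.2 with
            | some s => (st.1 ++ [(s, (c : Int) - 1)], none)
            | none => st
          else
            match st.2 with
            | some _ => st
            | none => (st.1, some (c : Int))) (rs, st)).1 ++ [(s, (m : Int) - 1)]
      | none => ((List.range' j k).foldl (fun (st : List (Int × Int) × Option Int) (c : Nat) =>
          if sepCols.contains (c : Int) then
            match st.2 with
            | some s => (st.1 ++ [(s, (c : Int) - 1)], none)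
            | none => st
          else
            match st.2 with
            | some _ => st
            | none => (st.1, some (c : Int))) (rs, st)).1).map
      (fun se : Int × Int => L.map (fun line => String.ofList (PySem.List.slice line (some se.1) (some (se.2 + 1))))))
    =
    (if (((List.range' j k).map (fun c => L.map (fun r => r.getD c ' '))).foldl
        (fun (st : List (List String) × List (List Char)) col =>
          if col.all (fun ch => ch == ' ') then
            if st.2.isEmpty then st
            else (st.1 ++ [(pvZipStar st.2).map String.ofList], ([] : List (List Char)))
          else (st.1, st.2 ++ [col])) (ps, g)).2.isEmpty then
      (((List.range' j k).map (fun c => L.map (fun r => r.getD c ' '))).foldl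
        (fun (st : List (List String) × List (List Char)) col =>
          if col.all (fun ch => ch == ' ') then
            if st.2.isEmpty then st
            else (st.1 ++ [(pvZipStar st.2).map String.ofList], ([] : List (List Char)))
          else (st.1, st.2 ++ [col])) (ps, g)).1
     else
      (((List.range' j k).map (fun c => L.map (fun r => r.getD c ' '))).foldl
        (fun (st : List (List String) × List (List Char)) col =>
          if col.all (fun ch => ch == ' ') then
            if st.2.isEmpty then st
            else (st.1 ++ [(pvZipStar st.2).map String.ofList], ([] : List (List Char)))
          else (st.1, st.2 ++ [col])) (ps, g)).1 ++
        [(pvZipStar (((List.range' j k).map (fun c => L.map (fun r => r.getD c ' '))).foldl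
          (fun (st : List (List String) × List (List Char)) col =>
            if col.all (fun ch => ch == ' ') then
              if st.2.isEmpty then st
              else (st.1 ++ [(pvZipStar st.2).map String.ofList], ([] : List (List Char)))
            else (st.1, st.2 ++ [col])) (ps, g)).2).map String.ofList]) := by
  intro k
  induction k with
  | zero =>
    intro j rs st ps g hjk hps hinv
    simp only [List.range'_zero, List.map_nil, List.foldl_nil]
    rcases hinv with ⟨h1, h2⟩ | ⟨s, h1, h2, h3⟩
    · subst h1 h2; simpa using hps.symm
    · subst h1
      have hj : j = m := by omega
      subst hj
      have hglen : g.length = j - s := by simp [h3]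
      have hge : g.isEmpty = false := by
        cases hg : g.isEmpty
        · rfl
        · exfalso; rw [List.isEmpty_iff] at hg; rw [hg] at hglen; simp at hglen; omega
      simp only [hge, Bool.false_eq_true, if_false]
      rw [List.map_append, ← hps]
      congr 1
      simp only [List.map_cons, List.map_nil]
      congr 1
      have hb : ((j : Int) - 1 + 1) = ((s : Int) + ((j - s : Nat) : Int)) := by omega
      rw [hb, h3]
      exact pv_extract_eq_flush L j s (j - s) hm hL (by omega) (by omega)
  | succ k ih =>
    intro j rs st ps g hjk hps hinv
    have hjm : j < m := by omega
    rw [List.range'_succ]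
    simp only [List.map_cons, List.foldl_cons, hsep j hjm]
    cases hb : (L.map (fun r => r.getD j ' ')).all (fun ch => ch == ' ') with
    | true =>
      rcases hinv with ⟨h1, h2⟩ | ⟨s, h1, h2, h3⟩
      · subst h1 h2
        simp only [List.isEmpty_nil, if_true]
        exact ih (j + 1) rs none ps [] (by omega) hps (Or.inl ⟨rfl, rfl⟩)
      · subst h1
        have hglen : g.length = j - s := by simp [h3]
        have hge : g.isEmpty = false := by
          cases hg : g.isEmpty
          · rfl
          · exfalso; rw [List.isEmpty_iff] at hg; rw [hg] at hglen; simp at hglen; omega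
        simp only [hge, Bool.false_eq_true, if_false]
        refine ih (j + 1) (rs ++ [((s : Int), (j : Int) - 1)]) none
          (ps ++ [(pvZipStar g).map String.ofList]) [] (by omega) ?_ (Or.inl ⟨rfl, rfl⟩)
        rw [List.map_append, ← hps]
        congr 1
        simp only [List.map_cons, List.map_nil]
        congr 1
        have hb2 : ((j : Int) - 1 + 1) = ((s : Int) + ((j - s : Nat) : Int)) := by omega
        rw [hb2, h3]
        exact (pv_extract_eq_flush L m s (j - s) hm hL (by omega) (by omega)).symm
    | false =>
      rcases hinv with ⟨h1, h2⟩ | ⟨s, h1, h2, h3⟩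
      · subst h1 h2
        refine ih (j + 1) rs (some (j : Int)) ps ([] ++ [L.map (fun r => r.getD j ' ')])
          (by omega) hps (Or.inr ⟨j, rfl, by omega, ?_⟩)
        have h4 : j + 1 - j = 1 := by omega
        simp [h4]
      · subst h1
        refine ih (j + 1) rs (some (s : Int)) ps (g ++ [L.map (fun r => r.getD j ' ')])
          (by omega) hps (Or.inr ⟨s, rfl, by omega, ?_⟩)
        have h4 : j + 1 - s = (j - s) + 1 := by omega
        have h5 : List.range' s ((j - s) + 1) = List.range' s (j - s) ++ [j] := by
          rw [List.range'_concat]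
          congr 2
          omega
        rw [h3, h4, h5, List.map_append]
        rfl

-- A's inner row-index comprehension is a map over the rows
theorem pv_colchars_eq (L : List (List Char)) (c : Int) :
    (PySem.List.pyRange 0 (PySem.List.len L) 1).map
      (fun r => PySem.List.pyGetD (PySem.List.pyGetD L r []) c ' ') =
    L.map (fun row => PySem.List.pyGetD row c ' ') := by
  have h1 : (PySem.List.pyRange 0 (PySem.List.len L) 1).map
      (fun r => PySem.List.pyGetD (PySem.List.pyGetD L r []) c ' ') =
      ((PySem.List.pyRange 0 (PySem.List.len L) 1).map (fun r => PySem.List.pyGetD L r [])).map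
        (fun row => PySem.List.pyGetD row c ' ') := by
    rw [List.map_map]; rfl
  rw [h1, PySem.List.map_pyGetD_pyRange_zero]

-- ===== VERDICT (by name: the statement is the Claim_ definition above) =====
theorem parse_worksheet_spec : Claim_equal_parse_worksheet := by
  intro input_text _
  unfold Spec_parse_worksheet parse_worksheet parse_worksheet_alt
  dsimp only
  cases hmax : PySem.List.max?
      ((PySem.Chars.splitOn (PySem.Chars.strip input_text.toList) ['\n']).map (fun l => (l.length : Int)))
      (fun x => x) with
  | none =>
    rw [PySem.List.max?_eq_none_iff] at hmax
    simp only [List.map_eq_nil_iff] at hmax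
    rw [if_pos hmax]
  | some maxLen =>
    have hnil : PySem.Chars.splitOn (PySem.Chars.strip input_text.toList) ['\n'] ≠ [] := by
      intro h
      rw [h, List.map_nil, (PySem.List.max?_eq_none_iff ([] : List Int) (fun x => x)).mpr rfl] at hmax
      simp at hmax
    rw [if_neg hnil]
    have hmem := PySem.List.max?_mem hmax
    obtain ⟨l0, hl0, hl0e⟩ := List.mem_map.mp hmem
    have hpos : 0 ≤ maxLen := by rw [← hl0e]; positivity
    obtain ⟨m, rfl⟩ : ∃ m : Nat, maxLen = (m : Int) := ⟨maxLen.toNat, by omega⟩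
    simp only [Int.toNat_natCast]
    set L : List (List Char) :=
      (PySem.Chars.splitOn (PySem.Chars.strip input_text.toList) ['\n']).map
        (fun l => l ++ List.replicate (m - l.length) ' ') with hLdef
    have hisMax := PySem.List.max?_isMax hmax
    have hm : ∀ r ∈ L, r.length = m := by
      intro r hr
      obtain ⟨l, hl, rfl⟩ := List.mem_map.mp hr
      have h1 : ((l.length : Int)) ≤ (m : Int) := hisMax _ (List.mem_map_of_mem hl)
      simp only [List.length_append, List.length_replicate]
      omega
    have hL : L ≠ [] := by
      rw [hLdef]
      simpa using hnil
    simp only [pv_colchars_eq, PySem.List.foldl_append_if_eq_filter, List.nil_append]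
    rw [PySem.List.pyRange_zero_natCast, List.foldl_map]
    have hcols : pvZipStar L = (List.range' 0 m).map (fun c => L.map (fun r => r.getD c ' ')) := by
      unfold pvZipStar
      have h1 : L.map List.length = L.map (fun _ => m) := List.map_congr_left (fun r hr => hm r hr)
      rw [h1, pv_min_map_const _ _ hL, List.range_eq_range']
    rw [hcols, List.range_eq_range']
    have hsep : ∀ j : Nat, j < m →
        (((List.map (fun k : Nat => (k : Int)) (List.range' 0 m)).filter
            (fun x => (L.map (fun row => PySem.List.pyGetD row x ' ')).all (fun ch => ch == ' '))).contains ((j : Nat) : Int))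
          = (L.map (fun r => r.getD j ' ')).all (fun ch => ch == ' ') := by
      intro j hj
      have hq : (L.map (fun row => PySem.List.pyGetD row ((j : Nat) : Int) ' ')) = L.map (fun r => r.getD j ' ') := by
        simp only [PySem.List.pyGetD_natCast]
      cases hb : (L.map (fun r => r.getD j ' ')).all (fun ch => ch == ' ') with
      | true =>
        refine List.contains_iff_mem.mpr (List.mem_filter.mpr ⟨List.mem_map.mpr ⟨j, (List.mem_range'_1).mpr ⟨Nat.zero_le j, by omega⟩, rfl⟩, ?_⟩)
        show (L.map (fun row => PySem.List.pyGetD row ((j : Nat) : Int) ' ')).all (fun ch => ch == ' ') = true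
        rw [hq, hb]
      | false =>
        cases hc : ((List.map (fun k : Nat => (k : Int)) (List.range' 0 m)).filter
            (fun x => (L.map (fun row => PySem.List.pyGetD row x ' ')).all (fun ch => ch == ' '))).contains ((j : Nat) : Int) with
        | false => rfl
        | true =>
          exfalso
          have h1 := (List.mem_filter.mp (List.contains_iff_mem.mp hc)).2
          rw [hq, hb] at h1
          exact Bool.false_ne_true h1
    exact pv_fold_main _ m _ hm hL hsep m 0 [] none [] [] (by omega) rfl (Or.inl ⟨rfl, rfl⟩)
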